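-- pv_equiv track=rewrite | github.com/nikjohn7/Coding-Challenges | Hackerrank/Python/31.py | gameOfThrones
-- ===== SOURCE A (Python) =====
-- from collections import Counter
--
-- def gameOfThrones(s):
--     counts=dict(Counter(s))
--     vals=list(counts.values())
--     if len(s)%2==0:
--         for i in vals:
--             if i%2==1:
--                 return 'NO'
--         return 'YES'
--     else:
--         cnt_odd=0
--         for i in vals:
--             if i%2==1:
--                 cnt_odd+=1
--         if cnt_odd==1:
--             return 'YES'
--         else:
--             return 'NO'
-- ===== SOURCE B (Python) =====
-- def gameOfThrones(s):
--     odd = set()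
--     for c in s:
--         if c in odd:
--             odd.discard(c)
--         else:
--             odd.add(c)
--     return 'YES' if len(odd) <= 1 else 'NO'
-- ===== Notes on version B (the rewrite author's own statement) =====
-- stated objective: simpler
-- what changed: Replaces the Counter dict plus the length-parity branch over its values with a single pass maintaining a set of characters seen an odd number of times; the answer is just len(odd) <= 1 (the parity of len(s) makes the two criteria coincide).
import Mathlib
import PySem

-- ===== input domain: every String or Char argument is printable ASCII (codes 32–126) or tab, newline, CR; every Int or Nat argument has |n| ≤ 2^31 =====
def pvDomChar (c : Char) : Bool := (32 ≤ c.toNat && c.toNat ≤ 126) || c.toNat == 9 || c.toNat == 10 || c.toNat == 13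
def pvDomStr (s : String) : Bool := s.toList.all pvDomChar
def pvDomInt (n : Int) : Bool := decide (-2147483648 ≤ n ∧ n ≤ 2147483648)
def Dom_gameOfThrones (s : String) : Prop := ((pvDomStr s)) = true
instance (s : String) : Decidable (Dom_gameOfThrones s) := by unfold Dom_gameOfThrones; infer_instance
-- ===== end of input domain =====

-- B replaces A's Counter dict plus length-parity branch with a single-pass odd-parity
-- set toggle and the single test len(odd) <= 1 (objective: simpler).

-- ===== PORT A =====
-- 'for i in vals: if i%2==1: return "NO"' / 'return "YES"' of the even branch
def pvAllEven : List Int → String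
  | [] => "YES"
  | i :: rest => if PySem.Int.mod i 2 == 1 then "NO" else pvAllEven rest

def gameOfThrones (s : String) : String :=
  let counts := PySem.Dict.counter s.toList
  let vals := PySem.Dict.values counts
  if PySem.Int.mod (PySem.Str.len s) 2 == 0 then
    pvAllEven vals
  else
    let cnt_odd := vals.foldl (fun cnt i => if PySem.Int.mod i 2 == 1 then cnt + 1 else cnt) (0 : Int)
    if cnt_odd == 1 then "YES" else "NO"

-- ===== PORT B =====
def gameOfThrones_alt (s : String) : String :=
  let odd := s.toList.foldl
    (fun od c => if PySem.Set.contains od c then PySem.Set.discard od c else PySem.Set.add od c)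
    (PySem.Set.empty : PySem.Set Char)
  if PySem.Set.len odd ≤ 1 then "YES" else "NO"

-- ===== PRECONDITION & SPEC =====
def Spec_gameOfThrones (s : String) (out : String) : Prop := out = gameOfThrones_alt s
instance (s : String) (out : String) : Decidable (Spec_gameOfThrones s out) := by unfold Spec_gameOfThrones; infer_instance

-- ===== CLAIM (what is proved, stated in full; the proofs are below) =====
def Claim_equal_gameOfThrones : Prop := ∀ (s : String), Dom_gameOfThrones s → Spec_gameOfThrones s (gameOfThrones s)

-- ===== LEMMAS AND PROOFS =====

-- Python mod of a nonnegative numerator by 2 is Nat mod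
theorem pvMod_natCast (n : Nat) : PySem.Int.mod (n : Int) 2 = ((n % 2 : Nat) : Int) := by
  simp [PySem.Int.mod, Int.fmod_eq_emod]

-- membership in a single toggle step
theorem pvToggle_mem (od : PySem.Set Char) (c x : Char) :
    x ∈ (if PySem.Set.contains od c then PySem.Set.discard od c else PySem.Set.add od c) ↔
      (if x = c then x ∉ od else x ∈ od) := by
  by_cases hc : c ∈ od <;> by_cases hx : x = c <;>
    simp [PySem.Set.discard, PySem.Set.add, hc, hx, List.mem_filter]

theorem pvToggle_nodup (od : PySem.Set Char) (c : Char) (h : od.Nodup) :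
    (if PySem.Set.contains od c then PySem.Set.discard od c else PySem.Set.add od c).Nodup := by
  split
  · exact PySem.Set.nodup_discard od c h
  · exact PySem.Set.nodup_add od c h

-- the toggle fold: nodup, and membership = odd count in the processed list
theorem pvFold_spec (l : List Char) (s0 : PySem.Set Char) (hs0 : s0.Nodup) :
    (l.foldl (fun od c => if PySem.Set.contains od c then PySem.Set.discard od c else PySem.Set.add od c) s0).Nodup ∧
    ∀ x, x ∈ (l.foldl (fun od c => if PySem.Set.contains od c then PySem.Set.discard od c else PySem.Set.add od c) s0) ↔
      ((x ∈ s0 ∧ l.count x % 2 = 0) ∨ (x ∉ s0 ∧ l.count x % 2 = 1)) := by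
  induction l generalizing s0 with
  | nil => exact ⟨hs0, fun x => by simp⟩
  | cons c rest ih =>
    have h1 := pvToggle_nodup s0 c hs0
    obtain ⟨hn, hm⟩ := ih _ h1
    refine ⟨hn, fun x => ?_⟩
    rw [List.foldl_cons] at *
    rw [hm x, pvToggle_mem]
    by_cases hx : x = c
    · subst hx
      by_cases h : x ∈ s0 <;> simp [h] <;> omega
    · simp [hx, Ne.symm hx]

-- pvAllEven returns "NO" iff some value is odd
theorem pvAllEven_eq (vals : List Int) :
    pvAllEven vals = if vals.any (fun i => PySem.Int.mod i 2 == 1) then "NO" else "YES" := by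
  induction vals with
  | nil => simp [pvAllEven]
  | cons i rest ih =>
    show (if PySem.Int.mod i 2 == 1 then "NO" else pvAllEven rest) = _
    rw [ih, List.any_cons]
    by_cases h : (PySem.Int.mod i 2 == 1) = true
    · rw [if_pos h, h, Bool.true_or, if_pos rfl]
    · have h' : (PySem.Int.mod i 2 == 1) = false := by simpa using h
      rw [if_neg h, h', Bool.false_or]

-- the counting fold is the filtered length
theorem pvCnt_eq (vals : List Int) (acc : Int) :
    vals.foldl (fun cnt i => if PySem.Int.mod i 2 == 1 then cnt + 1 else cnt) acc =
      acc + ((vals.filter (fun i => PySem.Int.mod i 2 == 1)).length : Int) := by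
  induction vals generalizing acc with
  | nil => simp
  | cons i rest ih =>
    rw [List.foldl_cons, List.filter_cons]
    by_cases h : (PySem.Int.mod i 2 == 1) = true
    · rw [if_pos h, if_pos h, ih]; simp only [List.length_cons]; push_cast; ring
    · rw [if_neg h, if_neg h, ih]

-- parity of a sum of mapped values equals parity of the number of odd ones
theorem pvParity_sum (f : Char → Nat) (ks : List Char) :
    (ks.map f).sum % 2 = (ks.filter (fun k => f k % 2 == 1)).length % 2 := by
  induction ks with
  | nil => rfl
  | cons k rest ih =>
    rw [List.map_cons, List.sum_cons, List.filter_cons]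
    by_cases h : f k % 2 = 1
    · rw [if_pos (by simpa using h)]; simp only [List.length_cons]; omega
    · rw [if_neg (by simpa using h)]; omega

-- two nodup char lists with the same membership have equal filtered lengths
theorem pvFilterLen_eq (p : Char → Bool) (l1 l2 : List Char) (h1 : l1.Nodup) (h2 : l2.Nodup)
    (h : ∀ x, x ∈ l1 ↔ x ∈ l2) :
    (l1.filter p).length = (l2.filter p).length :=
  ((List.perm_ext_iff_of_nodup h1 h2).2 h).filter p |>.length_eq

-- the central count: number of distinct chars of l with odd multiplicity
def pvNOdd (l : List Char) : Nat :=
  ((PySem.Set.ofList l).filter (fun k => l.count k % 2 == 1)).length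

-- A's value in terms of pvNOdd
theorem pvA_eq (s : String) :
    gameOfThrones s =
      if s.toList.length % 2 = 0 then
        (if pvNOdd s.toList = 0 then "YES" else "NO")
      else
        (if pvNOdd s.toList = 1 then "YES" else "NO") := by
  show (if (PySem.Int.mod (PySem.Str.len s) 2 == 0) = true
      then pvAllEven (PySem.Dict.values (PySem.Dict.counter s.toList))
      else if ((PySem.Dict.values (PySem.Dict.counter s.toList)).foldl
          (fun cnt i => if (PySem.Int.mod i 2 == 1) = true then cnt + 1 else cnt) (0 : Int) == 1) = true
        then "YES" else "NO") = _
  have hvals : PySem.Dict.values (PySem.Dict.counter s.toList) =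
      (PySem.Set.ofList s.toList).map (fun k => ((s.toList.count k : Nat) : Int)) := by
    show (PySem.Dict.items (PySem.Dict.counter s.toList)).map Prod.snd = _
    rw [PySem.Dict.items_counter]
    simp [List.map_map, Function.comp]
  have hlen : PySem.Int.mod (PySem.Str.len s) 2 = ((s.toList.length % 2 : Nat) : Int) := by
    rw [show PySem.Str.len s = ((s.toList.length : Nat) : Int) from rfl, pvMod_natCast]
  have hpred : ∀ k : Char,
      (PySem.Int.mod ((s.toList.count k : Nat) : Int) 2 == 1) = (s.toList.count k % 2 == 1) := by
    intro k
    rw [pvMod_natCast]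
    rcases Nat.mod_two_eq_zero_or_one (s.toList.count k) with h | h <;> simp [h]
  rw [hvals, hlen]
  have hany : (((PySem.Set.ofList s.toList).map (fun k => ((s.toList.count k : Nat) : Int))).any
      (fun i => PySem.Int.mod i 2 == 1)) = true ↔ pvNOdd s.toList ≠ 0 := by
    rw [List.any_map, List.any_eq_true]
    unfold pvNOdd
    simp only [Function.comp_def, hpred]
    rw [Ne, List.length_eq_zero_iff, List.eq_nil_iff_forall_not_mem]
    push Not
    simp [List.mem_filter]
  by_cases hpar : s.toList.length % 2 = 0
  · rw [if_pos (by rw [hpar]; decide), if_pos hpar, pvAllEven_eq]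
    by_cases h0 : pvNOdd s.toList = 0
    · rw [if_neg (fun hc => (hany.1 hc) h0), if_pos h0]
    · rw [if_pos (hany.2 h0), if_neg h0]
  · have h1 : s.toList.length % 2 = 1 := Nat.mod_two_eq_zero_or_one _ |>.resolve_left hpar
    rw [if_neg (by rw [h1]; decide), if_neg hpar]
    rw [pvCnt_eq, List.filter_map]
    simp only [Function.comp_def, hpred]
    simp only [List.length_map, zero_add]
    unfold pvNOdd
    by_cases he : ((PySem.Set.ofList s.toList).filter (fun k => s.toList.count k % 2 == 1)).length = 1
    · rw [if_pos (by simp [he]), if_pos he]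
    · rw [if_neg (by simpa using he), if_neg he]

-- B's value in terms of pvNOdd
theorem pvB_eq (s : String) :
    gameOfThrones_alt s = if pvNOdd s.toList ≤ 1 then "YES" else "NO" := by
  unfold gameOfThrones_alt
  obtain ⟨hn, hm⟩ := pvFold_spec s.toList PySem.Set.empty (by simp [PySem.Set.empty])
  have hmem : ∀ x, x ∈ (s.toList.foldl
      (fun od c => if PySem.Set.contains od c then PySem.Set.discard od c else PySem.Set.add od c)
      (PySem.Set.empty : PySem.Set Char)) ↔ (x ∈ s.toList ∧ s.toList.count x % 2 = 1) := by
    intro x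
    rw [hm x]
    simp [PySem.Set.empty]
    intro h
    exact List.count_pos_iff.1 (by omega)
  have hflen : (s.toList.foldl
      (fun od c => if PySem.Set.contains od c then PySem.Set.discard od c else PySem.Set.add od c)
      (PySem.Set.empty : PySem.Set Char)).length = pvNOdd s.toList := by
    unfold pvNOdd
    have hperm : (s.toList.foldl
        (fun od c => if PySem.Set.contains od c then PySem.Set.discard od c else PySem.Set.add od c)
        (PySem.Set.empty : PySem.Set Char)).Perm
        ((PySem.Set.ofList s.toList).filter (fun k => s.toList.count k % 2 == 1)) := by
      apply (List.perm_ext_iff_of_nodup hn ((PySem.Set.nodup_ofList _).filter _)).2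
      intro x
      rw [hmem x, List.mem_filter]
      simp [PySem.Set.mem_ofList]
    exact hperm.length_eq
  show (if PySem.Set.len _ ≤ 1 then "YES" else "NO") = _
  rw [show ∀ t : PySem.Set Char, PySem.Set.len t = ((t.length : Nat) : Int) from fun _ => rfl]
  rw [hflen]
  by_cases h : pvNOdd s.toList ≤ 1
  · rw [if_pos (by exact_mod_cast h), if_pos h]
  · rw [if_neg (by exact_mod_cast h), if_neg h]

-- parity link: pvNOdd l ≡ l.length (mod 2)
theorem pvNOdd_parity (l : List Char) : pvNOdd l % 2 = l.length % 2 := by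
  unfold pvNOdd
  have hsum : (l.dedup.map (fun x => l.count x)).sum = l.length :=
    List.sum_map_count_dedup_eq_length l
  have hpar := pvParity_sum (fun x => l.count x) l.dedup
  have hfl : (l.dedup.filter (fun k => l.count k % 2 == 1)).length =
      ((PySem.Set.ofList l).filter (fun k => l.count k % 2 == 1)).length := by
    apply pvFilterLen_eq _ _ _ (List.nodup_dedup l) (PySem.Set.nodup_ofList l)
    intro x
    rw [List.mem_dedup, PySem.Set.mem_ofList]
  omega

-- ===== VERDICT (by name: the statement is the Claim_ definition above) =====
theorem gameOfThrones_spec : Claim_equal_gameOfThrones := by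
  intro s _
  unfold Spec_gameOfThrones
  rw [pvA_eq, pvB_eq]
  have hp := pvNOdd_parity s.toList
  by_cases hpar : s.toList.length % 2 = 0
  · rw [if_pos hpar]
    by_cases h : pvNOdd s.toList = 0
    · rw [if_pos h, if_pos (by omega)]
    · rw [if_neg h, if_neg (by omega)]
  · rw [if_neg hpar]
    have h1 : s.toList.length % 2 = 1 := Nat.mod_two_eq_zero_or_one _ |>.resolve_left hpar
    by_cases h : pvNOdd s.toList = 1
    · rw [if_pos h, if_pos (by omega)]
    · rw [if_neg h, if_neg (by omega)]
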